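-- pv_equiv track=rewrite | github.com/filipus-samuel/learning | pyfiles/designer_door_mat.py | carpet
-- ===== SOURCE A (Python) =====
-- def carpet(n, m):
--     middle = int((n + 1) / 2)
--     mat_design = ""
--     temp_list = []
--     add_on = 0
--     for x in range(1, middle + 1):
--         if x == middle:
--             welcome_pattern = "WELCOME"
--             welcome_pattern_len = len(welcome_pattern)
--             dash_len = int((m - welcome_pattern_len) / 2)
--             dashes = ""
--             for i in range(dash_len):
--                 dashes += "-"
--             welcome_line = dashes + welcome_pattern + dashes
--             mat_design += welcome_line + "\n"
--         else:
--             mat_pattern = ".|."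
--
--             loop = x + add_on
--             for w in range(1, loop):
--                 mat_pattern += ".|."
--             mat_pattern_len = len(mat_pattern)
--             dash_len = int((m - mat_pattern_len) / 2)
--             dashes = ""
--             for i in range(dash_len):
--                 dashes += "-"
--             design_line = dashes + mat_pattern + dashes
--             mat_design += design_line + "\n"
--             temp_list.append(design_line)
--             add_on += 1
--
--     for i in range(1, len(temp_list) + 1):
--         mat_design += temp_list[len(temp_list) - i] + "\n"
--     mat_design = mat_design[:-1]  # remove last \n
--     return mat_design
-- ===== SOURCE B (Python) =====
-- def carpet(n, m):
--     mid = int((n + 1) / 2)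
--     L = 2 * mid - 1
--     rows = []
--     for j in range(L):
--         if j == mid - 1:
--             pat = "WELCOME"
--         else:
--             pat = ".|." * (2 * min(j, L - 1 - j) + 1)
--         dash = "-" * int((m - len(pat)) / 2)
--         rows.append(dash + pat + dash)
--     return "\n".join(rows)
-- ===== Notes on version B (the rewrite author's own statement) =====
-- stated objective: simpler
-- what changed: B computes the line count L = 2*((n+1)//2)-1 once and builds every row directly in a single pass (pattern width from the distance to the nearer edge, string repetition '-'*k / '.|.'*c instead of character-by-character += loops and a saved-then-reversed temp_list), joining rows with '\n'.join.
import Mathlib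
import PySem

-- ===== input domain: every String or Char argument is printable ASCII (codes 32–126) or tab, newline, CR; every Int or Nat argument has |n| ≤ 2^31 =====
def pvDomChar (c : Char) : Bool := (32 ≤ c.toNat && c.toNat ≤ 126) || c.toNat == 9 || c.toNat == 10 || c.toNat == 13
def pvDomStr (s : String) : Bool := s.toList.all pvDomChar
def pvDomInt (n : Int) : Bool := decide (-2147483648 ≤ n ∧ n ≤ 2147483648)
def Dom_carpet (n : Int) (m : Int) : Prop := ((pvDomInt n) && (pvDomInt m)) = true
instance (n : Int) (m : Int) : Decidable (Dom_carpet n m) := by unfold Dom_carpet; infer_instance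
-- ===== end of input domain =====

-- B builds each of the 2*((n+1)//2)-1 rows directly in one pass (pattern width from the
-- distance to the nearer edge) instead of A's build-top-half/append-reversed-temp_list
-- structure with character-by-character dash loops; objective: simpler.

-- ===== PORT A =====
-- for i in range(dash_len): dashes += "-"
def carpetDashes (dashLen : Int) : String :=
  (PySem.List.pyRange 0 dashLen).foldl (fun ds _ => ds ++ "-") ""

-- one iteration of A's main loop; state = (mat_design, temp_list, add_on)
def carpetStep (middle m : Int) (st : String × List String × Int) (x : Int) :
    String × List String × Int :=
  let matDesign := st.1
  let tempList := st.2.1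
  let addOn := st.2.2
  if x == middle then
    let welcomePattern := "WELCOME"
    let dashLen := PySem.Int.truncdiv (m - PySem.Str.len welcomePattern) 2
    let dashes := carpetDashes dashLen
    let welcomeLine := dashes ++ welcomePattern ++ dashes
    (matDesign ++ welcomeLine ++ "\n", tempList, addOn)
  else
    let matPattern := ".|."
    let loop := x + addOn
    let matPattern := (PySem.List.pyRange 1 loop).foldl (fun p _ => p ++ ".|.") matPattern
    let dashLen := PySem.Int.truncdiv (m - PySem.Str.len matPattern) 2
    let dashes := carpetDashes dashLen
    let designLine := dashes ++ matPattern ++ dashes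
    (matDesign ++ designLine ++ "\n", tempList ++ [designLine], addOn + 1)

def carpet (n : Int) (m : Int) : String :=
  let middle := PySem.Int.truncdiv (n + 1) 2
  let st := (PySem.List.pyRange 1 (middle + 1)).foldl (carpetStep middle m) ("", [], 0)
  let matDesign := st.1
  let tempList := st.2.1
  -- for i in range(1, len(temp_list)+1): mat_design += temp_list[len(temp_list)-i] + "\n"
  let matDesign := (PySem.List.pyRange 1 ((tempList.length : Int) + 1)).foldl
    (fun s i => s ++ ((PySem.List.pyGet? tempList ((tempList.length : Int) - i)).getD "") ++ "\n")
    matDesign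
  PySem.Str.slice matDesign none (some (-1))

-- ===== PORT B =====
-- s * k  (Python string repetition; empty for k ≤ 0)
def strTimes (s : String) (k : Int) : String :=
  String.ofList (PySem.List.pyRepeat s.toList k)

def carpet_alt (n : Int) (m : Int) : String :=
  let mid := PySem.Int.truncdiv (n + 1) 2
  let L := 2 * mid - 1
  let rows := (PySem.List.pyRange 0 L).foldl
    (fun (rows : List String) j =>
      let pat := if j == mid - 1 then "WELCOME"
                 else strTimes ".|." (2 * min j (L - 1 - j) + 1)
      let dash := strTimes "-" (PySem.Int.truncdiv (m - PySem.Str.len pat) 2)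
      rows ++ [dash ++ pat ++ dash]) []
  PySem.Str.join "\n" rows

-- ===== PRECONDITION & SPEC =====
def Spec_carpet (n : Int) (m : Int) (out : String) : Prop := out = carpet_alt n m
instance (n : Int) (m : Int) (out : String) : Decidable (Spec_carpet n m out) := by
  unfold Spec_carpet; infer_instance

-- ===== CLAIM (what is proved, stated in full; the proofs are below) =====
def Claim_equal_carpet : Prop := ∀ (n : Int) (m : Int), Dom_carpet n m → Spec_carpet n m (carpet n m)

-- ===== LEMMAS AND PROOFS =====

-- canonical rows, on char lists
def patC (c : Nat) : List Char := (List.replicate c ['.', '|', '.']).flatten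

def rowC (m : Int) (p : List Char) : List Char :=
  let d := List.replicate (PySem.Int.truncdiv (m - (p.length : Int)) 2).toNat '-'
  d ++ p ++ d

def rowS (m : Int) (p : List Char) : String := String.ofList (rowC m p)

def topRows (k : Nat) (m : Int) : List String :=
  (List.range k).map (fun i => rowS m (patC (2 * i + 1)))

def allRows (k : Nat) (m : Int) : List String :=
  topRows k m ++ [rowS m "WELCOME".toList] ++ (topRows k m).reverse

-- generic: a string-accumulating foldl is a join of a map
theorem foldl_str_append {α : Type} (l : List α) (g : α → String) (s : String) :
    (l.foldl (fun acc x => acc ++ g x) s).toList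
      = s.toList ++ (l.map (fun x => (g x).toList)).flatten := by
  induction l generalizing s with
  | nil => simp
  | cons a t ih => simp [ih, String.toList_append]

theorem carpetDashes_eq (d : Int) :
    carpetDashes d = String.ofList (List.replicate d.toNat '-') := by
  rw [← String.toList_inj]
  rw [carpetDashes, foldl_str_append]
  simp [PySem.List.length_pyRange_one, List.map_const']

theorem pat_fold_eq (t : Int) (ht : 1 ≤ t) :
    ((PySem.List.pyRange 1 t).foldl (fun p _ => p ++ ".|.") ".|.") =
      String.ofList (patC t.toNat) := by
  rw [← String.toList_inj, foldl_str_append]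
  have hlen : (PySem.List.pyRange 1 t).length = (t - 1).toNat :=
    PySem.List.length_pyRange_one 1 t
  have h2 : t.toNat = (t - 1).toNat + 1 := by omega
  rw [h2]
  simp only [List.map_const', hlen, patC, List.replicate_succ, List.flatten_cons,
    String.toList_ofList]
  rfl

theorem strTimes_toList (s : String) (c : Int) :
    (strTimes s c).toList = (List.replicate c.toNat s.toList).flatten := by
  simp [strTimes, PySem.List.pyRepeat]

-- A's else-branch line equals the canonical row
theorem lineA_eq (m t : Int) (ht : 1 ≤ t)
    (p : String) (hp : p = (PySem.List.pyRange 1 t).foldl (fun p _ => p ++ ".|.") ".|.") :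
    carpetDashes (PySem.Int.truncdiv (m - PySem.Str.len p) 2) ++ p ++
      carpetDashes (PySem.Int.truncdiv (m - PySem.Str.len p) 2)
      = rowS m (patC t.toNat) := by
  subst hp
  rw [pat_fold_eq t ht, carpetDashes_eq, ← String.toList_inj]
  simp [rowS, rowC]

-- A's welcome line equals the canonical row
theorem lineW_eq (m : Int) :
    carpetDashes (PySem.Int.truncdiv (m - PySem.Str.len "WELCOME") 2) ++ "WELCOME" ++
      carpetDashes (PySem.Int.truncdiv (m - PySem.Str.len "WELCOME") 2)
      = rowS m "WELCOME".toList := by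
  rw [carpetDashes_eq, ← String.toList_inj]
  simp [rowS, rowC]

-- main-loop invariant for A (the part strictly before the WELCOME row)
theorem A_main (middle m : Int) (k a : Nat) (h : (a : Int) + k < middle)
    (s : String) (tl : List String) :
    (PySem.List.pyRange ((a : Int) + 1) ((a : Int) + 1 + k)).foldl (carpetStep middle m)
        (s, tl, (a : Int)) =
      (String.ofList (s.toList ++
         ((List.range k).map (fun i => rowC m (patC (2 * (a + i) + 1)) ++ ['\n'])).flatten),
       tl ++ (List.range k).map (fun i => rowS m (patC (2 * (a + i) + 1))),
       (a : Int) + k) := by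
  induction k generalizing s tl with
  | zero =>
    rw [show ((a : Int) + 1 + (0:Nat)) = (a : Int) + 1 by push_cast; ring,
        PySem.List.pyRange_one_eq_nil (by omega)]
    simp
  | succ k ih =>
    push_cast
    have hsplit : PySem.List.pyRange ((a : Int) + 1) ((a : Int) + 1 + (k + 1))
        = PySem.List.pyRange ((a : Int) + 1) ((a : Int) + 1 + k) ++ [(a : Int) + 1 + k] := by
      have := PySem.List.pyRange_one_succ_right
        (a := (a : Int) + 1) (b := (a : Int) + 1 + k) (by omega)
      rw [← this]; ring_nf
    rw [hsplit, List.foldl_append]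
    have ihh := ih (by omega) s tl
    push_cast at ihh
    rw [ihh]
    have hne : ¬ ((a : Int) + 1 + k == middle) = true := by
      simp only [beq_iff_eq]; omega
    simp only [List.foldl_cons, List.foldl_nil, carpetStep, hne, Bool.false_eq_true,
      if_false]
    rw [show (a : Int) + 1 + (k : Int) + ((a : Int) + (k : Int)) = ((2 * (a + k) + 1 : Nat) : Int)
          by push_cast; ring]
    rw [lineA_eq m ((2 * (a + k) + 1 : Nat) : Int) (by push_cast; omega) _ rfl]
    rw [Int.toNat_natCast]
    refine Prod.ext ?_ (Prod.ext ?_ ?_)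
    · rw [← String.toList_inj]
      simp [rowS, List.range_succ, String.toList_append]
    · simp [List.range_succ]
    · simp; ring
  
-- the reversing second loop of A, generalized to the last c iterations
theorem A_rev_gen (tl : List String) (c : Nat) (hc : c ≤ tl.length) (md : String) :
    (PySem.List.pyRange ((tl.length : Int) - c + 1) ((tl.length : Int) + 1)).foldl
        (fun s i => s ++ ((PySem.List.pyGet? tl ((tl.length : Int) - i)).getD "") ++ "\n") md
      = String.ofList (md.toList ++
          (((tl.take c).reverse).map (fun r => r.toList ++ ['\n'])).flatten) := by
  induction c generalizing md with
  | zero =>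
    rw [show (tl.length : Int) - (0:Nat) + 1 = (tl.length : Int) + 1 by omega,
        PySem.List.pyRange_one_eq_nil (by omega)]
    simp
  | succ c ih =>
    have hlt : c < tl.length := by omega
    have hcons : PySem.List.pyRange ((tl.length : Int) - (c+1:Nat) + 1) ((tl.length : Int) + 1)
        = ((tl.length : Int) - (c+1:Nat) + 1) ::
            PySem.List.pyRange ((tl.length : Int) - (c:Nat) + 1) ((tl.length : Int) + 1) := by
      rw [PySem.List.pyRange_one_cons (by push_cast; omega)]
      congr 1
      push_cast; ring
    rw [hcons, List.foldl_cons]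
    have hidx : (tl.length : Int) - ((tl.length : Int) - (c+1:Nat) + 1) = ((c:Nat) : Int) := by
      push_cast; ring
    rw [hidx, PySem.List.pyGet?_natCast]
    have hget : tl[c]?.getD "" = tl[c] := by
      rw [List.getElem?_eq_getElem hlt]; rfl
    rw [hget, ih (by omega)]
    rw [← String.toList_inj]
    have htake : tl.take (c+1) = tl.take c ++ [tl[c]] := by
      rw [List.take_add_one, List.getElem?_eq_getElem hlt]; rfl
    rw [htake]
    simp only [String.toList_ofList, String.toList_append, List.reverse_append,
      List.reverse_cons, List.reverse_nil, List.nil_append, List.map_cons, List.flatten_cons,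
      List.append_assoc, List.cons_append]
    rfl

theorem A_rev_loop (tl : List String) (md : String) :
    (PySem.List.pyRange 1 ((tl.length : Int) + 1)).foldl
        (fun s i => s ++ ((PySem.List.pyGet? tl ((tl.length : Int) - i)).getD "") ++ "\n") md
      = String.ofList (md.toList ++ (tl.reverse.map (fun r => r.toList ++ ['\n'])).flatten) := by
  have := A_rev_gen tl tl.length (le_refl _) md
  rw [show (tl.length : Int) - (tl.length : Nat) + 1 = 1 by omega] at this
  simpa using this

-- joining rows with '\n' then dropping the final char is '\n'-intercalation
theorem flatten_dropLast (rows : List String) (h : rows ≠ []) :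
    ((rows.map (fun r => r.toList ++ ['\n'])).flatten).dropLast
      = PySem.Chars.join ['\n'] (rows.map String.toList) := by
  induction rows with
  | nil => simp at h
  | cons r rest ih =>
    cases rest with
    | nil =>
      simp only [List.map_cons, List.map_nil, PySem.Chars.join_singleton, List.flatten_cons,
        List.flatten_nil, List.append_nil]
      exact List.dropLast_concat ..
    | cons q rest' =>
      have hne : ((List.map (fun r => r.toList ++ ['\n']) (q :: rest')).flatten) ≠ [] := by
        simp
      calc ((List.map (fun r => r.toList ++ ['\n']) (r :: q :: rest')).flatten).dropLast
          = ((r.toList ++ ['\n']) ++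
              (List.map (fun r => r.toList ++ ['\n']) (q :: rest')).flatten).dropLast := by
            simp [List.append_assoc]
        _ = (r.toList ++ ['\n']) ++
              ((List.map (fun r => r.toList ++ ['\n']) (q :: rest')).flatten).dropLast :=
            List.dropLast_append_of_ne_nil hne
        _ = (r.toList ++ ['\n']) ++
              PySem.Chars.join ['\n'] (List.map String.toList (q :: rest')) := by
            rw [ih (by simp)]
        _ = PySem.Chars.join ['\n'] (List.map String.toList (r :: q :: rest')) := by
            simp only [List.map_cons, PySem.Chars.join_cons_cons]

-- A's result, characterized
theorem carpet_eq (n m : Int) (k : Nat) (hk : PySem.Int.truncdiv (n + 1) 2 = (k : Int) + 1) :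
    carpet n m = PySem.Str.join "\n" (allRows k m) := by
  unfold carpet
  dsimp only
  rw [hk]
  have hmain := A_main ((k:Int)+1) m k 0 (by omega) "" []
  simp only [Nat.cast_zero, zero_add] at hmain
  have hsplit : PySem.List.pyRange 1 ((k : Int) + 1 + 1)
      = PySem.List.pyRange 1 (1 + (k : Int)) ++ [(k : Int) + 1] := by
    rw [show ((1:Int) + (k : Int)) = (k : Int) + 1 from by ring]
    exact PySem.List.pyRange_one_succ_right (by omega)
  rw [hsplit, List.foldl_append, hmain]
  simp only [List.foldl_cons, List.foldl_nil, carpetStep, BEq.rfl, if_true]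
  rw [lineW_eq m]
  simp only [List.nil_append]
  rw [A_rev_loop]
  rw [← String.toList_inj, PySem.Str.toList_slice, PySem.Str.toList_join]
  simp only [PySem.Chars.slice_eq_listSlice, PySem.List.slice_to_neg_one]
  rw [show "\n".toList = ['\n'] from rfl,
      ← flatten_dropLast (allRows k m) (by simp [allRows])]
  refine congrArg List.dropLast ?_
  simp [allRows, topRows, rowS, List.map_map, Function.comp_def, String.toList_append,
    List.flatten_append, List.append_assoc]

-- B's row expressions equal the canonical rows
theorem rowB_eq (m : Int) (c : Nat) :
    strTimes "-" (PySem.Int.truncdiv (m - PySem.Str.len (strTimes ".|." ((c:Nat) : Int))) 2) ++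
      strTimes ".|." ((c:Nat) : Int) ++
      strTimes "-" (PySem.Int.truncdiv (m - PySem.Str.len (strTimes ".|." ((c:Nat) : Int))) 2)
      = rowS m (patC c) := by
  rw [← String.toList_inj]
  simp [strTimes_toList, rowS, rowC, patC, String.toList_append]

theorem rowBW_eq (m : Int) :
    strTimes "-" (PySem.Int.truncdiv (m - PySem.Str.len "WELCOME") 2) ++ "WELCOME" ++
      strTimes "-" (PySem.Int.truncdiv (m - PySem.Str.len "WELCOME") 2)
      = rowS m "WELCOME".toList := by
  rw [← String.toList_inj]
  simp [strTimes_toList, rowS, rowC, String.toList_append]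

-- B's result, characterized
theorem carpet_alt_eq (n m : Int) (k : Nat) (hk : PySem.Int.truncdiv (n + 1) 2 = (k : Int) + 1) :
    carpet_alt n m = PySem.Str.join "\n" (allRows k m) := by
  unfold carpet_alt
  dsimp only
  rw [hk]
  rw [show 2 * ((k:Int) + 1) - 1 = ((2*k+1 : Nat) : Int) from by push_cast; ring]
  rw [PySem.List.pyRange_zero_natCast, PySem.List.foldl_append_singleton_eq_map]
  refine congrArg (PySem.Str.join "\n") ?_
  rw [List.nil_append, List.map_map]
  have hr : List.range (2*k+1) = (List.range k ++ [k]) ++ (List.range k).map (fun i => k+1+i) := by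
    rw [show 2*k+1 = (k+1)+k from by ring, List.range_add, List.range_succ]
  rw [hr]
  simp only [List.map_append, allRows]
  congr 1
  · congr 1
    · -- top rows
      refine List.map_congr_left (fun i hi => ?_)
      have hik : i < k := List.mem_range.mp hi
      simp only [Function.comp_apply]
      have hcond : (((i:Nat) : Int) == (k:Int) + 1 - 1) = false := by
        rw [beq_eq_false_iff_ne]; intro hcontra; omega
      rw [hcond]
      simp only [Bool.false_eq_true, if_false]
      rw [show min ((i:Nat) : Int) (((2*k+1 : Nat) : Int) - 1 - ((i:Nat) : Int)) = ((i:Nat) : Int)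
            from min_eq_left (by push_cast; omega)]
      rw [show 2 * ((i:Nat) : Int) + 1 = ((2*i+1 : Nat) : Int) from by push_cast; ring]
      exact rowB_eq m (2*i+1)
    · -- the WELCOME row
      simp only [List.map_cons, List.map_nil, Function.comp_apply]
      have hcond : (((k:Nat) : Int) == (k:Int) + 1 - 1) = true := by
        rw [beq_iff_eq]; ring
      rw [hcond]
      simp only [if_true]
      rw [rowBW_eq m]
    -- bottom rows
  · rw [List.map_map]
    refine List.ext_getElem (by simp [topRows]) (fun i hi1 hi2 => ?_)
    simp only [List.length_map, List.length_range] at hi1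
    simp only [List.getElem_map, List.getElem_range, Function.comp_apply]
    have hcond : (((k+1+i : Nat) : Int) == (k:Int) + 1 - 1) = false := by
      rw [beq_eq_false_iff_ne]; intro hcontra; omega
    rw [hcond]
    simp only [Bool.false_eq_true, if_false]
    rw [show min (((k+1+i : Nat)) : Int) (((2*k+1 : Nat) : Int) - 1 - ((k+1+i : Nat) : Int))
          = ((k-1-i : Nat) : Int) from (min_eq_right (by omega)).trans (by omega)]
    rw [show 2 * (((k-1-i : Nat)) : Int) + 1 = ((2*(k-1-i)+1 : Nat) : Int) from by push_cast; ring]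
    rw [rowB_eq m (2*(k-1-i)+1)]
    rw [List.getElem_reverse]
    simp only [topRows, List.getElem_map, List.getElem_range, List.length_map, List.length_range]
  
theorem carpet_eq_nil (n m : Int) (hk : PySem.Int.truncdiv (n + 1) 2 ≤ 0) :
    carpet n m = "" := by
  have h1 : PySem.List.pyRange 1 (PySem.Int.truncdiv (n + 1) 2 + 1) = ([] : List Int) :=
    PySem.List.pyRange_one_eq_nil (by omega)
  have h2 : PySem.List.pyRange 1 ((([] : List String).length : Int) + 1) = ([] : List Int) :=
    PySem.List.pyRange_one_eq_nil (by simp)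
  unfold carpet
  dsimp only
  rw [h1]
  simp only [List.foldl_nil]
  rw [h2]
  simp only [List.foldl_nil]
  rw [← String.toList_inj]
  simp [pysem]

theorem carpet_alt_eq_nil (n m : Int) (hk : PySem.Int.truncdiv (n + 1) 2 ≤ 0) :
    carpet_alt n m = "" := by
  have : PySem.List.pyRange 0 (2 * PySem.Int.truncdiv (n + 1) 2 - 1) = ([] : List Int) :=
    PySem.List.pyRange_one_eq_nil (by omega)
  simp [carpet_alt, this, PySem.Str.join]

-- ===== VERDICT (by name: the statement is the Claim_ definition above) =====
theorem carpet_spec : Claim_equal_carpet := by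
  intro n m _
  unfold Spec_carpet
  by_cases h : PySem.Int.truncdiv (n + 1) 2 ≤ 0
  · rw [carpet_eq_nil n m h, carpet_alt_eq_nil n m h]
  · obtain ⟨k, hk⟩ : ∃ k : Nat, PySem.Int.truncdiv (n + 1) 2 = (k : Int) + 1 :=
      ⟨(PySem.Int.truncdiv (n + 1) 2 - 1).toNat, by omega⟩
    rw [carpet_eq n m k hk, carpet_alt_eq n m k hk]
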